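-- pv_equiv track=rewrite | github.com/KinWanderer/Draw-a-card | draw_a_card.py | draw_card
-- ===== SOURCE A (Python) =====
-- def draw_card(deck, number_of_cards):
--   hand = []
--   for _ in range(number_of_cards):
--     if deck:
--       hand.append(deck.pop())
--     else:
--       break
--   return hand, deck
-- ===== SOURCE B (Python) =====
-- def draw_card(deck, number_of_cards):
--   n = max(0, min(number_of_cards, len(deck)))
--   cut = len(deck) - n
--   hand = deck[cut:][::-1]
--   del deck[cut:]
--   return hand, deck
-- ===== Notes on version B (the rewrite author's own statement) =====
-- stated objective: simpler
-- what changed: Replaces the pop-one-at-a-time loop with a clamped count and a single reversed tail slice plus one in-place tail deletion.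
import Mathlib
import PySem

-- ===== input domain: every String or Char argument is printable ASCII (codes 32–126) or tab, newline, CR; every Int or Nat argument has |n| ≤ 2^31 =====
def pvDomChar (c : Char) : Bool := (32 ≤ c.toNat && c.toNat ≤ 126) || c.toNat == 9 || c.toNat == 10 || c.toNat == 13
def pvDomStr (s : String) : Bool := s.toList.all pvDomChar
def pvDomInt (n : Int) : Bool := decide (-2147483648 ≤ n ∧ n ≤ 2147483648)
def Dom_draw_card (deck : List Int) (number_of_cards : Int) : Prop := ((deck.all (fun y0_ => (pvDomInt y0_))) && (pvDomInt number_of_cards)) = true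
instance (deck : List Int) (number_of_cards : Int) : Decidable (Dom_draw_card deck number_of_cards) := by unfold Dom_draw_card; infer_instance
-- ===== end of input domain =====

-- ===== PORT A =====
-- Re-implementation B: clamp-then-slice instead of A's pop loop; equivalence is about the
-- RETURN value (both Pythons also mutate `deck` in place identically).
-- A's loop: up to `fuel` iterations, each pops the last element of deck onto hand, breaking on empty.
def drawLoopA (hand deck : List Int) : Nat → List Int × List Int
  | 0 => (hand, deck)
  | fuel + 1 =>
    if deck = [] then (hand, deck)
    else drawLoopA (hand ++ [deck.getLast!]) deck.dropLast fuel

def draw_card (deck : List Int) (number_of_cards : Int) : List Int × List Int :=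
  drawLoopA [] deck number_of_cards.toNat

-- ===== PORT B =====
def draw_card_alt (deck : List Int) (number_of_cards : Int) : List Int × List Int :=
  let n : Nat := min number_of_cards.toNat deck.length  -- max(0, min(k, len)) via Int.toNat
  let cut : Nat := deck.length - n
  ((deck.drop cut).reverse, deck.take cut)

-- ===== PRECONDITION & SPEC =====
def Spec_draw_card (deck : List Int) (number_of_cards : Int) (out : List Int × List Int) : Prop := out = draw_card_alt deck number_of_cards
instance (deck : List Int) (number_of_cards : Int) (out : List Int × List Int) : Decidable (Spec_draw_card deck number_of_cards out) := by unfold Spec_draw_card; infer_instance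

-- ===== CLAIM (what is proved, stated in full; the proofs are below) =====
def Claim_equal_draw_card : Prop := ∀ (deck : List Int) (number_of_cards : Int), Dom_draw_card deck number_of_cards → Spec_draw_card deck number_of_cards (draw_card deck number_of_cards)

-- ===== LEMMAS AND PROOFS =====

-- ===== VERDICT (by name: the statement is the Claim_ definition above) =====
lemma drawLoopA_eq (fuel : Nat) : ∀ (hand deck : List Int),
    drawLoopA hand deck fuel =
      (hand ++ (deck.drop (deck.length - min fuel deck.length)).reverse,
       deck.take (deck.length - min fuel deck.length)) := by
  induction fuel with
  | zero => intro hand deck; simp [drawLoopA]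
  | succ f ih =>
    intro hand deck
    rcases List.eq_nil_or_concat deck with rfl | ⟨ys, a, rfl⟩
    · simp [drawLoopA]
    · have h : ys ++ [a] ≠ [] := by simp
      rw [List.concat_eq_append] at *
      rw [drawLoopA, if_neg h, ih]
      have hlast : (ys ++ [a]).getLast! = a := by
        cases hys : ys ++ [a] with
        | nil => exact absurd hys h
        | cons z zs =>
          simp only [List.getLast!]
          simp only [← hys]
          simp
      have hdl : (ys ++ [a]).dropLast = ys := by simp
      rw [hlast, hdl]
      have hL : (ys ++ [a]).length = ys.length + 1 := by simp
      have hk : (ys ++ [a]).length - min (f + 1) (ys ++ [a]).length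
          = ys.length - min f ys.length := by rw [hL]; omega
      have hle : ys.length - min f ys.length ≤ ys.length := by omega
      rw [hk]
      refine Prod.ext ?_ ?_
      · simp only
        rw [List.append_assoc]
        congr 1
        rw [List.drop_append_of_le_length hle, List.reverse_append]
        simp
      · simp only
        rw [List.take_append_of_le_length hle]

theorem draw_card_spec : Claim_equal_draw_card := by
  intro deck n _
  show draw_card deck n = draw_card_alt deck n
  rw [draw_card, drawLoopA_eq, draw_card_alt]
  simp
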